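-- pv_equiv track=rewrite | github.com/besteaydemir/multi-turn-rl | analysis/compare_experiments.py | parse_experiment_name
-- ===== SOURCE A (Python) =====
-- from typing import Dict, List, Tuple
--
-- def parse_experiment_name(exp_name: str) -> Dict:
--     """Parse experiment directory name to extract configuration."""
--     parts = exp_name.split("_")
--
--     config = {
--         "timestamp": parts[0],
--         "method": None,
--         "model": None,
--         "dataset": None,
--         "frames_steps": None,
--         "split": None,
--     }
--
--     # Method (sequential or video)
--     if "sequential" in exp_name:
--         config["method"] = "sequential"
--     elif "video" in exp_name:
--         config["method"] = "video"
--
--     # Model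
--     for part in parts:
--         if "Qwen3-VL" in part:
--             config["model"] = part
--             break
--
--     # Dataset
--     for part in parts:
--         if part in ["arkitscenes", "scannet", "combined"]:
--             config["dataset"] = part
--             break
--
--     # Frames/Steps
--     for part in parts:
--         if "frames" in part or "steps" in part:
--             config["frames_steps"] = part
--             break
--
--     # Split info
--     for part in parts:
--         if "split" in part:
--             config["split"] = part
--             break
--
--     return config
-- ===== SOURCE B (Python) =====
-- def parse_experiment_name(exp_name: str):
--     """Parse experiment directory name to extract configuration.
--
--     Walks the parts back-to-front with unconditional overwrites, so the
--     last write (= first match in original order) wins; no breaks, no guards.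
--     """
--     parts = exp_name.split("_")
--
--     config = {
--         "timestamp": parts[0],
--         "method": None,
--         "model": None,
--         "dataset": None,
--         "frames_steps": None,
--         "split": None,
--     }
--
--     if "sequential" in exp_name:
--         config["method"] = "sequential"
--     elif "video" in exp_name:
--         config["method"] = "video"
--
--     for part in reversed(parts):
--         if "Qwen3-VL" in part:
--             config["model"] = part
--         if part in ("arkitscenes", "scannet", "combined"):
--             config["dataset"] = part
--         if "frames" in part or "steps" in part:
--             config["frames_steps"] = part
--         if "split" in part:
--             config["split"] = part
--
--     return config
-- ===== Notes on version B (the rewrite author's own statement) =====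
-- stated objective: alternative
-- what changed: A's four separate forward first-match-then-break scans are replaced by one reversed traversal with unconditional overwrites: last-write-wins over the reversed parts realizes first-match semantics without breaks or None guards.
import Mathlib
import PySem

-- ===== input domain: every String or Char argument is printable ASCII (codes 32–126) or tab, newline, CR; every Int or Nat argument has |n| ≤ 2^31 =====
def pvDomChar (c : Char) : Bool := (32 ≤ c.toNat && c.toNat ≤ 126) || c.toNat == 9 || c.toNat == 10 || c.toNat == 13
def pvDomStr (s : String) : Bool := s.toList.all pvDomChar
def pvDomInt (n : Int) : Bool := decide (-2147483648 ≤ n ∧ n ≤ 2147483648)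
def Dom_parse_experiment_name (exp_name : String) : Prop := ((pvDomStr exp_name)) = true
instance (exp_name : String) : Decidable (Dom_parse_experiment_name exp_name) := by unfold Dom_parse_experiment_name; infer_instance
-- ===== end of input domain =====

-- B replaces A's four forward first-match-then-break scans by one reversed traversal with
-- unconditional overwrites (last write = first match); same return value, no speed claim.

-- ===== PORT A =====
-- Each Python `for part in parts: if <pred>: config[key] = part; break` loop is this
-- helper (the four loops share one shape; key/pred are the only differences).
def pvALoop (key : String) (pred : String → Bool) :
    List String → PySem.Dict String (Option String) → PySem.Dict String (Option String)
  | [], c => c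
  | p :: rest, c => if pred p then c.insert key (some p) else pvALoop key pred rest c

def parse_experiment_name (exp_name : String) : List (String × Option String) :=
  let parts := (PySem.Str.split? exp_name "_").getD []
  -- split? is some for the nonempty literal separator "_", and str.split never returns
  -- an empty list, so getD []/headD never take their defaults (parts[0] cannot raise)
  -- the Python dict literal (all six keys distinct), as an insertion-ordered PySem.Dict
  let config : PySem.Dict String (Option String) := PySem.Dict.mk
    [("timestamp", some (parts.headD "")), ("method", none), ("model", none),
     ("dataset", none), ("frames_steps", none), ("split", none)]
  let config :=
    if PySem.Str.isIn "sequential" exp_name then config.insert "method" (some "sequential")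
    else if PySem.Str.isIn "video" exp_name then config.insert "method" (some "video")
    else config
  let config := pvALoop "model" (fun p => PySem.Str.isIn "Qwen3-VL" p) parts config
  let config := pvALoop "dataset" (fun p => ["arkitscenes", "scannet", "combined"].contains p) parts config
  let config := pvALoop "frames_steps" (fun p => PySem.Str.isIn "frames" p || PySem.Str.isIn "steps" p) parts config
  let config := pvALoop "split" (fun p => PySem.Str.isIn "split" p) parts config
  config.items

-- ===== PORT B =====
-- B's reversed loop: one step overwrites every matching slot unconditionally.
def pvBStep (st : Option String × Option String × Option String × Option String)
    (p : String) : Option String × Option String × Option String × Option String :=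
  ( if PySem.Str.isIn "Qwen3-VL" p then some p else st.1,
    if ["arkitscenes", "scannet", "combined"].contains p then some p else st.2.1,
    if PySem.Str.isIn "frames" p || PySem.Str.isIn "steps" p then some p else st.2.2.1,
    if PySem.Str.isIn "split" p then some p else st.2.2.2 )

def parse_experiment_name_alt (exp_name : String) : List (String × Option String) :=
  let parts := (PySem.Str.split? exp_name "_").getD []
  let method :=
    if PySem.Str.isIn "sequential" exp_name then some "sequential"
    else if PySem.Str.isIn "video" exp_name then some "video"
    else none
  let st := parts.reverse.foldl pvBStep (none, none, none, none)
  [("timestamp", some (parts.headD "")), ("method", method), ("model", st.1),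
   ("dataset", st.2.1), ("frames_steps", st.2.2.1), ("split", st.2.2.2)]

-- ===== PRECONDITION & SPEC =====
def Spec_parse_experiment_name (exp_name : String) (out : List (String × Option String)) : Prop := out = parse_experiment_name_alt exp_name
instance (exp_name : String) (out : List (String × Option String)) : Decidable (Spec_parse_experiment_name exp_name out) := by unfold Spec_parse_experiment_name; infer_instance

-- ===== CLAIM (what is proved, stated in full; the proofs are below) =====
def Claim_equal_parse_experiment_name : Prop := ∀ (exp_name : String), Dom_parse_experiment_name exp_name → Spec_parse_experiment_name exp_name (parse_experiment_name exp_name)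

-- ===== LEMMAS AND PROOFS =====

-- A's loop stops at the first matching part and writes it; in terms of find?:
theorem pvALoop_eq (key : String) (pred : String → Bool) (parts : List String)
    (c : PySem.Dict String (Option String)) :
    pvALoop key pred parts c =
      match parts.find? pred with
      | some p => c.insert key (some p)
      | none => c := by
  induction parts with
  | nil => rfl
  | cons p rest ih =>
    by_cases h : pred p <;> simp [pvALoop, List.find?, h, ih]

-- one slot's value after B's reversed overwrite fold: first match, else the initial value
def pvRes (pred : String → Bool) (o : Option String) (parts : List String) : Option String :=
  match parts.find? pred with
  | some x => some x
  | none => o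

-- unfolding pvRes one element: the head wins when it matches
theorem pvRes_cons (pred : String → Bool) (o : Option String) (p : String) (rest : List String) :
    pvRes pred o (p :: rest) = if pred p then some p else pvRes pred o rest := by
  by_cases h : pred p <;> simp [pvRes, List.find?, h]

-- B's fold over the REVERSED parts computes, slotwise, the first match in original order:
-- the leftmost matching part is written last, so it wins.
theorem pvBFold_eq (parts : List String)
    (mo da fs sp : Option String) :
    parts.reverse.foldl pvBStep (mo, da, fs, sp) =
      ( pvRes (fun p => PySem.Str.isIn "Qwen3-VL" p) mo parts,
        pvRes (fun p => ["arkitscenes", "scannet", "combined"].contains p) da parts,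
        pvRes (fun p => PySem.Str.isIn "frames" p || PySem.Str.isIn "steps" p) fs parts,
        pvRes (fun p => PySem.Str.isIn "split" p) sp parts ) := by
  induction parts generalizing mo da fs sp with
  | nil => rfl
  | cons p rest ih =>
    -- reverse (p :: rest) folds rest.reverse first, then applies the step to p last
    simp only [List.reverse_cons, List.foldl_append, List.foldl_cons, List.foldl_nil, ih,
      pvBStep, pvRes_cons]

-- A's method if/elif writes into the literal dict; folded into one insert of the chosen value
-- (inserting none for an existing "method" ↦ none entry leaves the dict unchanged).
theorem pvMethod_eq (t : Option String) (b1 b2 : Bool) :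
    (if b1 = true then
        (PySem.Dict.mk [("timestamp", t), ("method", none), ("model", none),
          ("dataset", none), ("frames_steps", none), ("split", none)]).insert "method" (some "sequential")
      else if b2 = true then
        (PySem.Dict.mk [("timestamp", t), ("method", none), ("model", none),
          ("dataset", none), ("frames_steps", none), ("split", none)]).insert "method" (some "video")
      else
        PySem.Dict.mk [("timestamp", t), ("method", none), ("model", none),
          ("dataset", none), ("frames_steps", none), ("split", none)]) =
    (PySem.Dict.mk [("timestamp", t), ("method", none), ("model", none),
      ("dataset", none), ("frames_steps", none), ("split", none)]).insert "method"
        (if b1 = true then some "sequential" else if b2 = true then some "video" else none) := by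
  cases b1 <;> cases b2 <;> rfl

-- ===== VERDICT (by name: the statement is the Claim_ definition above) =====
theorem parse_experiment_name_spec : Claim_equal_parse_experiment_name := by
  intro exp_name _
  unfold Spec_parse_experiment_name parse_experiment_name parse_experiment_name_alt
  simp only [pvALoop_eq, pvBFold_eq, pvMethod_eq]
  generalize (if PySem.Str.isIn "sequential" exp_name = true then some "sequential"
    else if PySem.Str.isIn "video" exp_name = true then some "video" else (none : Option String)) = m
  cases h1 : ((PySem.Str.split? exp_name "_").getD []).find? (fun p => PySem.Str.isIn "Qwen3-VL" p) <;>
  cases h2 : ((PySem.Str.split? exp_name "_").getD []).find? (fun p => ["arkitscenes", "scannet", "combined"].contains p) <;>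
  cases h3 : ((PySem.Str.split? exp_name "_").getD []).find? (fun p => PySem.Str.isIn "frames" p || PySem.Str.isIn "steps" p) <;>
  cases h4 : ((PySem.Str.split? exp_name "_").getD []).find? (fun p => PySem.Str.isIn "split" p) <;>
  simp only [pvRes, h1, h2, h3, h4, PySem.Dict.items_insert, PySem.Dict.contains_insert,
    PySem.Dict.contains_mk, List.map, List.contains] <;> rfl
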